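-- pv_equiv track=rewrite | github.com/artur-deluca/PQRST-Segmentation | utils/data_utils.py | get_mask
-- ===== SOURCE A (Python) =====
-- def get_mask(table, length):
--     """
--     using label to mask signal
--
--     Args:
--         table: (list) with sized [#segments_in_signal, 3]
--         length: (int) signal length
--     Returns:
--         mask: (list) with sized [length]
--     """
--     mask = [0] * length
--     for triplet in table:
--         start = triplet[0]
--         end = triplet[2]
--         for i in range(start, end, 1):
--             mask[i] = 1
--     return mask
-- ===== SOURCE B (Python) =====
-- def get_mask(table, length):
--     delta = [0] * (length + 1)
--     for triplet in table:
--         start = triplet[0]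
--         end = triplet[2]
--         if start < end:
--             delta[start] += 1
--             delta[end] -= 1
--     mask = []
--     run = 0
--     for i in range(length):
--         run += delta[i]
--         mask.append(1 if run > 0 else 0)
--     return mask
-- ===== Notes on version B (the rewrite author's own statement) =====
-- stated objective: alternative
-- what changed: Replaced the per-index nested fill (write 1 at every index of every interval) by a difference array: +1/-1 endpoint marks per interval followed by one prefix-sum sweep that emits 1 where the running count is positive.
-- outside the precondition, e.g. on get_mask([[-2, 0, 0]], 3): A returns [0, 1, 1], B returns [0, 0, 0]; on get_mask([[1, 0]], 2): A raises IndexError, B raises IndexError; on get_mask([[0, 0, 5]], 3): A raises IndexError, B raises IndexError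
import Mathlib
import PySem

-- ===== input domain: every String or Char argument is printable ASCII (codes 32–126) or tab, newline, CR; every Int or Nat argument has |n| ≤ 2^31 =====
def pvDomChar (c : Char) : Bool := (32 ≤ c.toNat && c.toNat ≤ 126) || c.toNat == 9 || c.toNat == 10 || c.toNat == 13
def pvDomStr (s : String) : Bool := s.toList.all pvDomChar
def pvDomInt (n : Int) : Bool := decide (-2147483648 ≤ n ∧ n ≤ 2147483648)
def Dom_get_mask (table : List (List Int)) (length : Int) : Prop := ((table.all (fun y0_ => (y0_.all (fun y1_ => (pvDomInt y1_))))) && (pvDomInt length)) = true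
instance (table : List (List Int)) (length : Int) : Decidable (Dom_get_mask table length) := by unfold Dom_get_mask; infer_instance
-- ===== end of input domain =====

-- B replaces the per-index interval fill by a difference array: endpoint +1/-1 marks, then one prefix-sum sweep over the signal (a different algorithm of similar cost).

-- ===== PORT A =====
def get_mask (table : List (List Int)) (length : Int) : List Int :=
  table.foldl
    (fun mask triplet =>
      let start := PySem.List.pyGetD triplet 0 0
      let stop := PySem.List.pyGetD triplet 2 0
      (PySem.List.pyRange start stop 1).foldl (fun m i => PySem.List.pySetD m i 1) mask)
    (List.replicate length.toNat 0)

-- ===== PORT B =====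
def get_mask_alt (table : List (List Int)) (length : Int) : List Int :=
  let delta := table.foldl
    (fun d triplet =>
      let s := PySem.List.pyGetD triplet 0 0
      let e := PySem.List.pyGetD triplet 2 0
      if s < e then
        let d1 := PySem.List.pySetD d s (PySem.List.pyGetD d s 0 + 1)
        PySem.List.pySetD d1 e (PySem.List.pyGetD d1 e 0 - 1)
      else d)
    (List.replicate (length + 1).toNat 0)
  ((PySem.List.pyRange 0 length 1).foldl
    (fun (acc : List Int × Int) i =>
      let run := acc.2 + PySem.List.pyGetD delta i 0
      (acc.1 ++ [if 0 < run then (1 : Int) else 0], run))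
    ([], 0)).1

-- ===== PRECONDITION & SPEC =====
-- Pre_ excludes rows shorter than 3 entries and rows whose non-empty interval leaves [0, length]
-- (there A raises IndexError, except for negative starts reachable only through Python's
-- negative-index wraparound — malformed segment boundaries outside the natural domain).
def Pre_get_mask (table : List (List Int)) (length : Int) : Prop :=
  ∀ t ∈ table, 3 ≤ t.length ∧
    (PySem.List.pyGetD t 0 0 < PySem.List.pyGetD t 2 0 →
      0 ≤ PySem.List.pyGetD t 0 0 ∧ PySem.List.pyGetD t 2 0 ≤ length)
instance (table : List (List Int)) (length : Int) : Decidable (Pre_get_mask table length) := by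
  unfold Pre_get_mask; infer_instance

def pvWitness_get_mask : List (List Int) × Int := ([[0, 1, 2], [1, 2, 3]], 4)

def Spec_get_mask (table : List (List Int)) (length : Int) (out : List Int) : Prop := out = get_mask_alt table length
instance (table : List (List Int)) (length : Int) (out : List Int) : Decidable (Spec_get_mask table length out) := by unfold Spec_get_mask; infer_instance

-- ===== CLAIM (what is proved, stated in full; the proofs are below) =====
def Claim_equal_get_mask : Prop := ∀ (table : List (List Int)) (length : Int), Dom_get_mask table length → Pre_get_mask table length → Spec_get_mask table length (get_mask table length)

-- ===== LEMMAS AND PROOFS =====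

-- abbreviations for a row's start / end entries (proof-side only)
def pvS (t : List Int) : Int := PySem.List.pyGetD t 0 0
def pvE (t : List Int) : Int := PySem.List.pyGetD t 2 0

-- does row t cover index k?
def pvCovers (t : List Int) (k : Int) : Bool := decide (pvS t ≤ k ∧ k < pvE t)
def pvCov (table : List (List Int)) (k : Int) : Bool := table.any (fun t => pvCovers t k)

-- setting an element of a map-over-range list
theorem pv_set_map_range (n j : Nat) (g : Nat → Int) (v : Int) :
    ((List.range n).map g).set j v = (List.range n).map (fun k => if k = j then v else g k) := by
  apply List.ext_getElem
  · simp
  · intro i h1 h2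
    simp only [List.getElem_set, List.getElem_map, List.getElem_range]
    split_ifs with h3 h4 h4
    · rfl
    · exact absurd h3.symm h4
    · exact absurd h4.symm h3
    · rfl

-- A's inner loop: filling [s, e) with ones on a map-over-range list
theorem pv_fillA_aux (n : Nat) (e : Int) :
    ∀ (c : Nat) (s : Int) (g : Nat → Int), (e - s).toNat = c → 0 ≤ s →
    (PySem.List.pyRange s e 1).foldl (fun m i => PySem.List.pySetD m i 1) ((List.range n).map g)
      = (List.range n).map (fun (k : Nat) => if s ≤ (k : Int) ∧ (k : Int) < e then 1 else g k) := by
  intro c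
  induction c with
  | zero =>
    intro s g hc hs
    rw [PySem.List.pyRange_one_eq_nil (by omega)]
    simp only [List.foldl_nil]
    refine (List.map_congr_left ?_).symm
    intro k hk
    rw [if_neg (by omega)]
  | succ c ih =>
    intro s g hc hs
    have hse : s < e := by omega
    rw [PySem.List.pyRange_one_cons hse]
    simp only [List.foldl_cons]
    rw [PySem.List.pySetD_of_nonneg _ 1 hs, pv_set_map_range,
        ih (s + 1) _ (by omega) (by omega)]
    refine List.map_congr_left ?_
    intro k hk
    simp only [List.mem_range] at hk
    split_ifs <;> omega

theorem pv_fillA (n : Nat) (s e : Int) (g : Nat → Int) (h : s < e → 0 ≤ s ∧ e ≤ (n : Int)) :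
    (PySem.List.pyRange s e 1).foldl (fun m i => PySem.List.pySetD m i 1) ((List.range n).map g)
      = (List.range n).map (fun (k : Nat) => if s ≤ (k : Int) ∧ (k : Int) < e then 1 else g k) := by
  by_cases hse : s < e
  · exact pv_fillA_aux n e (e - s).toNat s g rfl (h hse).1
  · rw [PySem.List.pyRange_one_eq_nil (by omega)]
    simp only [List.foldl_nil]
    refine (List.map_congr_left ?_).symm
    intro k hk
    rw [if_neg (by omega)]

-- A's outer loop characterized
theorem pv_A_fold (table : List (List Int)) (n : Nat) (g : Nat → Int)
    (h : ∀ t ∈ table, pvS t < pvE t → 0 ≤ pvS t ∧ pvE t ≤ (n : Int)) :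
    table.foldl
      (fun mask triplet =>
        (PySem.List.pyRange (PySem.List.pyGetD triplet 0 0) (PySem.List.pyGetD triplet 2 0) 1).foldl
          (fun m i => PySem.List.pySetD m i 1) mask)
      ((List.range n).map g)
      = (List.range n).map (fun (k : Nat) => if pvCov table (k : Int) then 1 else g k) := by
  induction table generalizing g with
  | nil =>
    simp only [List.foldl_nil]
    refine (List.map_congr_left ?_).symm
    intro k _
    simp [pvCov]
  | cons t ts ih =>
    simp only [List.foldl_cons]
    have ht := h t (List.mem_cons_self ..)
    rw [show PySem.List.pyGetD t 0 0 = pvS t from rfl, show PySem.List.pyGetD t 2 0 = pvE t from rfl,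
        pv_fillA n (pvS t) (pvE t) g ht,
        ih _ (fun u hu => h u (List.mem_cons_of_mem _ hu))]
    refine List.map_congr_left ?_
    intro k _
    simp only [pvCov, List.any_cons, pvCovers]
    by_cases h1 : pvS t ≤ (k : Int) ∧ (k : Int) < pvE t <;> simp [h1]

-- one row's contribution to delta at index i
def pvContrib (t : List Int) (i : Int) : Int :=
  if pvS t < pvE t then (if pvS t = i then 1 else 0) - (if pvE t = i then 1 else 0) else 0
def pvDSum (table : List (List Int)) (i : Int) : Int := (table.map (fun t => pvContrib t i)).sum

-- B's delta-building loop characterized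
theorem pv_B_delta (table : List (List Int)) (m : Nat) (g : Nat → Int)
    (h : ∀ t ∈ table, pvS t < pvE t → 0 ≤ pvS t ∧ pvE t < (m : Int)) :
    table.foldl
      (fun d triplet =>
        if PySem.List.pyGetD triplet 0 0 < PySem.List.pyGetD triplet 2 0 then
          PySem.List.pySetD
            (PySem.List.pySetD d (PySem.List.pyGetD triplet 0 0)
              (PySem.List.pyGetD d (PySem.List.pyGetD triplet 0 0) 0 + 1))
            (PySem.List.pyGetD triplet 2 0)
            (PySem.List.pyGetD
              (PySem.List.pySetD d (PySem.List.pyGetD triplet 0 0)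
                (PySem.List.pyGetD d (PySem.List.pyGetD triplet 0 0) 0 + 1))
              (PySem.List.pyGetD triplet 2 0) 0 - 1)
        else d)
      ((List.range m).map g)
      = (List.range m).map (fun (k : Nat) => g k + pvDSum table (k : Int)) := by
  induction table generalizing g with
  | nil =>
    simp only [List.foldl_nil]
    refine (List.map_congr_left ?_).symm
    intro k _
    simp [pvDSum]
  | cons t ts ih =>
    simp only [List.foldl_cons]
    have ht := h t (List.mem_cons_self ..)
    rw [show PySem.List.pyGetD t 0 0 = pvS t from rfl, show PySem.List.pyGetD t 2 0 = pvE t from rfl]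
    have hcons : ∀ (k : Nat) (x : Int), x + pvDSum (t :: ts) (k : Int) = (x + pvContrib t (k : Int)) + pvDSum ts (k : Int) := by
      intro k x; simp [pvDSum]; ring
    by_cases hse : pvS t < pvE t
    · obtain ⟨hs0, hem⟩ := ht hse
      have he0 : (0 : Int) ≤ pvE t := by omega
      rw [if_pos hse]
      rw [PySem.List.pyGetD_eq_getElem _ _ hs0 (by simpa using (by omega : pvS t < (m : Int)))]
      simp only [List.getElem_map, List.getElem_range]
      rw [PySem.List.pySetD_of_nonneg _ _ hs0, pv_set_map_range]
      rw [PySem.List.pyGetD_eq_getElem _ _ he0 (by simpa using hem)]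
      simp only [List.getElem_map, List.getElem_range]
      rw [PySem.List.pySetD_of_nonneg _ _ he0, pv_set_map_range]
      rw [ih _ (fun u hu => h u (List.mem_cons_of_mem _ hu))]
      refine List.map_congr_left ?_
      intro k _
      rw [hcons]
      congr 1
      simp only [pvContrib, if_pos hse]
      split_ifs <;> (try subst_vars) <;> omega
    · rw [if_neg hse, ih _ (fun u hu => h u (List.mem_cons_of_mem _ hu))]
      refine List.map_congr_left ?_
      intro k _
      rw [hcons]
      simp [pvContrib, hse]

-- partial sums of delta
def pvPSum (delta : List Int) (m : Nat) : Int := ((List.range m).map (fun i => delta.getD i 0)).sum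

-- B's prefix-sum sweep characterized
theorem pv_scanB (delta : List Int) (m : Nat) :
    (PySem.List.pyRange 0 (m : Int) 1).foldl
      (fun (acc : List Int × Int) i =>
        (acc.1 ++ [if 0 < acc.2 + PySem.List.pyGetD delta i 0 then (1 : Int) else 0],
          acc.2 + PySem.List.pyGetD delta i 0))
      ([], 0)
      = ((List.range m).map (fun k => if 0 < pvPSum delta (k + 1) then (1 : Int) else 0),
          pvPSum delta m) := by
  induction m with
  | zero =>
    rw [PySem.List.pyRange_one_eq_nil (by omega)]
    simp [pvPSum]
  | succ m ih =>
    have hc : ((m + 1 : Nat) : Int) = (m : Int) + 1 := by push_cast; ring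
    rw [hc, PySem.List.pyRange_one_succ_right (by positivity), List.foldl_append, ih]
    simp only [List.foldl_cons, List.foldl_nil, PySem.List.pyGetD_natCast]
    have hp : pvPSum delta (m + 1) = pvPSum delta m + delta.getD m 0 := by
      simp [pvPSum, List.range_succ]
    rw [List.range_succ, List.map_append]
    simp [hp]

-- the partial sums of the per-index contributions of one row, in closed form
theorem pv_contrib_sum (t : List Int) (M : Nat) (h : pvS t < pvE t → 0 ≤ pvS t) :
    ((List.range M).map (fun (i : Nat) => pvContrib t (i : Int))).sum
      = if pvS t < pvE t then
          (if pvS t < (M : Int) then 1 else 0) - (if pvE t < (M : Int) then 1 else 0)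
        else 0 := by
  induction M with
  | zero =>
    simp only [List.range_zero, List.map_nil, List.sum_nil]
    split_ifs <;> omega
  | succ M ih =>
    rw [List.range_succ, List.map_append, List.sum_append, ih]
    simp only [List.map_cons, List.map_nil, List.sum_cons, List.sum_nil, pvContrib]
    have hc : ((M + 1 : Nat) : Int) = (M : Int) + 1 := by push_cast; ring
    rw [hc]
    split_ifs <;> omega

-- swap the two summations
theorem pv_psum_swap (table : List (List Int)) (M : Nat) :
    ((List.range M).map (fun (i : Nat) => pvDSum table (i : Int))).sum
      = (table.map (fun t => ((List.range M).map (fun (i : Nat) => pvContrib t (i : Int))).sum)).sum := by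
  induction table with
  | nil => simp [pvDSum]
  | cons t ts ih =>
    simp only [List.map_cons, List.sum_cons, ← ih, pvDSum]
    rw [← PySem.List.sum_map_add_int]

-- a 0/1 sum is nonnegative, and positive iff some element satisfies the predicate
theorem pv_sum_pos_iff (l : List (List Int)) (p : List Int → Bool) :
    0 ≤ (l.map (fun t => if p t then (1 : Int) else 0)).sum ∧
    (0 < (l.map (fun t => if p t then (1 : Int) else 0)).sum ↔ l.any p = true) := by
  induction l with
  | nil => simp
  | cons t ts ih =>
    obtain ⟨ih1, ih2⟩ := ih
    simp only [List.map_cons, List.sum_cons, List.any_cons, Bool.or_eq_true]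
    by_cases hp : p t = true
    · simp only [hp, if_true, true_or, iff_true]
      exact ⟨by omega, by omega⟩
    · simp only [hp, if_false, Bool.false_eq_true, false_or, zero_add]
      exact ⟨ih1, ih2⟩

-- ===== VERDICT (by name: the statement is the Claim_ definition above) =====
theorem get_mask_spec : Claim_equal_get_mask := by
  intro table length _hdom hpre
  have hpre' : ∀ t ∈ table, pvS t < pvE t → 0 ≤ pvS t ∧ pvE t ≤ length :=
    fun t ht => (hpre t ht).2
  unfold Spec_get_mask
  simp only [get_mask, get_mask_alt]
  have hrep : ∀ c : Nat, List.replicate c (0 : Int) = (List.range c).map (fun _ => 0) := by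
    intro c; simp [List.map_const']
  have hA : ∀ t ∈ table, pvS t < pvE t → 0 ≤ pvS t ∧ pvE t ≤ ((length.toNat : Nat) : Int) := by
    intro t ht hse
    obtain ⟨h1, h2⟩ := hpre' t ht hse
    exact ⟨h1, by omega⟩
  rw [hrep, pv_A_fold table length.toNat _ hA]
  by_cases hlen : 0 ≤ length
  · have hnl : ((length.toNat : Nat) : Int) = length := Int.toNat_of_nonneg hlen
    have hm : (length + 1).toNat = length.toNat + 1 := by omega
    have hB : ∀ t ∈ table, pvS t < pvE t → 0 ≤ pvS t ∧ pvE t < ((length.toNat + 1 : Nat) : Int) := by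
      intro t ht hse
      obtain ⟨h1, h2⟩ := hpre' t ht hse
      refine ⟨h1, by push_cast; omega⟩
    rw [hm, hrep, pv_B_delta table (length.toNat + 1) _ hB,
        show PySem.List.pyRange 0 length 1 = PySem.List.pyRange 0 ((length.toNat : Nat) : Int) 1 by
          rw [hnl],
        pv_scanB]
    refine (List.map_congr_left ?_).symm
    intro k hk
    simp only [List.mem_range] at hk
    have h1 : pvPSum ((List.range (length.toNat + 1)).map (fun (k : Nat) => (0 : Int) + pvDSum table (k : Int))) (k + 1)
        = ((List.range (k + 1)).map (fun (i : Nat) => pvDSum table (i : Int))).sum := by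
      unfold pvPSum
      refine congrArg List.sum (List.map_congr_left ?_)
      intro i hi
      simp only [List.mem_range] at hi
      rw [PySem.List.getD_map_range _ _ _ _ (by omega), zero_add]
    rw [h1, pv_psum_swap]
    have h2 : (table.map (fun t => ((List.range (k + 1)).map (fun (i : Nat) => pvContrib t (i : Int))).sum)).sum
        = (table.map (fun t => if pvCovers t (k : Int) then (1 : Int) else 0)).sum := by
      refine congrArg List.sum (List.map_congr_left ?_)
      intro t htm
      have hv := hpre' t htm
      rw [pv_contrib_sum t (k + 1) (fun hse => (hv hse).1)]
      simp only [pvCovers, decide_eq_true_eq]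
      have hc : ((k + 1 : Nat) : Int) = (k : Int) + 1 := by push_cast; ring
      rw [hc]
      split_ifs <;> omega
    rw [h2]
    obtain ⟨hnn, hiff⟩ := pv_sum_pos_iff table (fun t => pvCovers t (k : Int))
    by_cases hc : pvCov table (k : Int) = true
    · rw [if_pos hc, if_pos (hiff.mpr hc)]
    · rw [if_neg hc, if_neg (fun hpos => hc (hiff.mp hpos))]
  · have h0 : length.toNat = 0 := by omega
    rw [PySem.List.pyRange_one_eq_nil (by omega)]
    simp [h0]
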